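-- pv_equiv track=rewrite | github.com/dmgie/ClInt | vartable/vartable_executer.py | get_filname_prefixes
-- ===== SOURCE A (Python) =====
-- def get_filname_prefixes(meta_dict_sorted, condition_type):
--     filename_prefixes = {}
--
--     for patient in meta_dict_sorted:
--         for condition in meta_dict_sorted[patient]:
--             if condition == condition_type:
--                 for type in meta_dict_sorted[patient][condition]:
--                     for sample in meta_dict_sorted[patient][condition][type]:
--                         if patient in filename_prefixes:
--                             if type in filename_prefixes[patient]:
--                                 filename_prefixes[patient][type].append(meta_dict_sorted[patient][condition][type][sample]["alt_identifier"])
--                             else: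
--                                 filename_prefixes[patient][type] = [meta_dict_sorted[patient][condition][type][sample]["alt_identifier"]]
--                         else:
--                             filename_prefixes[patient] = {type: [meta_dict_sorted[patient][condition][type][sample]["alt_identifier"]]}
--
--     return filename_prefixes
-- ===== SOURCE B (Python) =====
-- def get_filname_prefixes(meta_dict_sorted, condition_type):
--     # Pass 1: flatten the nested metadata into a stream of (patient, type, alt) triples.
--     triples = [
--         (patient, typ, meta["alt_identifier"])
--         for patient, conditions in meta_dict_sorted.items()
--         for condition, types in conditions.items()
--         if condition == condition_type
--         for typ, samples in types.items()
--         for meta in samples.values()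
--     ]
--     # Pass 2: group once by the flat composite (patient, type) key -- one level,
--     # no nested-dict membership branching.
--     flat = {}
--     for p, t, a in triples:
--         flat.setdefault((p, t), []).append(a)
--     # Pass 3: reassemble the two-level shape from the flat groups: skeleton of
--     # patients first (first-occurrence order), then fill each (patient, type) slot.
--     result = {p: {} for (p, t) in flat}
--     for (p, t), vals in flat.items():
--         result[p][t] = vals
--     return result
-- ===== Notes on version B (the rewrite author's own statement) =====
-- stated objective: alternative
-- what changed: A's single pass that incrementally grows a dict-of-dicts with a 3-way membership branch is replaced by three stages: flatten to a (patient, type, alt) triple stream, group once by the flat composite (patient, type) key, then reassemble the two-level shape from the flat groups (patient skeleton first, then fill each slot).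
import Mathlib
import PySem

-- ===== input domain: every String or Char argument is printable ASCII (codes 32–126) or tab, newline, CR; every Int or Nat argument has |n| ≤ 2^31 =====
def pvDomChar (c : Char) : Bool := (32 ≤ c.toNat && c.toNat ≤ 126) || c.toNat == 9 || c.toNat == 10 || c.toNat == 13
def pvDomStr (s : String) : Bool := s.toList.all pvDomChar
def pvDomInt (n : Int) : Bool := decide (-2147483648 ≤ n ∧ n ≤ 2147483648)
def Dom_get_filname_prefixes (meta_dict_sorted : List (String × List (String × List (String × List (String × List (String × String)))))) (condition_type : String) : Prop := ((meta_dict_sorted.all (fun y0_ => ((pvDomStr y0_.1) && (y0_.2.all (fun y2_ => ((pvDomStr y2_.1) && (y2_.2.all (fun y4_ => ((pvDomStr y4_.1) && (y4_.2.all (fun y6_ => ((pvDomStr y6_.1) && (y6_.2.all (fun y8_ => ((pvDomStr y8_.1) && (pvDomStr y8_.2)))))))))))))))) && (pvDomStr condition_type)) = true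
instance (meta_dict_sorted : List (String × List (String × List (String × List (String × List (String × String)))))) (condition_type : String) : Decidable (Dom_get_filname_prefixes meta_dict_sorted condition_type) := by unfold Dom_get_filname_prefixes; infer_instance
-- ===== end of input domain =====

-- B replaces A's incremental dict-of-dicts grouping by a flatten-to-triples pass, one flat
-- grouping by the composite (patient, type) key, and a reassembly of the two-level shape
-- from the flat groups (objective: alternative — a different grouping algorithm, same cost).

-- sample["alt_identifier"]: first-match dict lookup; "" is never reached inside Pre_ (a missing key is a KeyError, excluded by Pre_)
def pvAlt (d : List (String × String)) : String := (PySem.Dict.mk d).getD "alt_identifier" ""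

-- ===== PORT A =====
def get_filname_prefixes (meta_dict_sorted : List (String × List (String × List (String × List (String × List (String × String)))))) (condition_type : String) : List (String × List (String × List String)) :=
  let fp : PySem.Dict String (PySem.Dict String (List String)) :=
    meta_dict_sorted.foldl (fun fp pe =>
      pe.2.foldl (fun fp ce =>
        if ce.1 == condition_type then
          ce.2.foldl (fun fp te =>
            te.2.foldl (fun fp se =>
              if fp.contains pe.1 then
                let inner := fp.getD pe.1 PySem.Dict.empty
                if inner.contains te.1 then
                  fp.insert pe.1 (inner.insert te.1 (inner.getD te.1 [] ++ [pvAlt se.2]))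
                else
                  fp.insert pe.1 (inner.insert te.1 [pvAlt se.2])
              else
                fp.insert pe.1 (PySem.Dict.mk [(te.1, [pvAlt se.2])])
            ) fp
          ) fp
        else fp
      ) fp
    ) PySem.Dict.empty
  fp.items.map (fun q => (q.1, q.2.items))

-- ===== PORT B =====
-- pass 1 of Source B: the flat stream of (patient, type, alt) triples
def pvTriples (meta_dict_sorted : List (String × List (String × List (String × List (String × List (String × String)))))) (condition_type : String) : List (String × String × String) :=
  meta_dict_sorted.flatMap (fun pe =>
    pe.2.flatMap (fun ce =>
      if ce.1 == condition_type then
        ce.2.flatMap (fun te => te.2.map (fun se => (pe.1, te.1, pvAlt se.2)))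
      else []))

-- passes 2 and 3 of Source B: one flat grouping by the composite (patient, type) key,
-- then reassembly (skeleton of patients, then fill each (patient, type) slot;
-- 'result[p][t] = vals' is modify at p — p is always present — inserting t)
def get_filname_prefixes_alt (meta_dict_sorted : List (String × List (String × List (String × List (String × List (String × String)))))) (condition_type : String) : List (String × List (String × List String)) :=
  let ts := pvTriples meta_dict_sorted condition_type
  let flat : PySem.Dict (String × String) (List String) :=
    ts.foldl (fun d tr => d.modify (tr.1, tr.2.1) [] (· ++ [tr.2.2])) PySem.Dict.empty
  let result0 : PySem.Dict String (PySem.Dict String (List String)) :=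
    flat.items.foldl (fun r q => r.insert q.1.1 PySem.Dict.empty) PySem.Dict.empty
  let result := flat.items.foldl
    (fun r q => r.modify q.1.1 PySem.Dict.empty (fun inner => inner.insert q.1.2 q.2)) result0
  result.items.map (fun q => (q.1, q.2.items))

-- ===== PRECONDITION & SPEC =====
-- Pre_ excludes exactly the inputs on which A raises KeyError: a sample dict under a
-- condition equal to condition_type that has no "alt_identifier" key.
def Pre_get_filname_prefixes (meta_dict_sorted : List (String × List (String × List (String × List (String × List (String × String)))))) (condition_type : String) : Prop :=
  (meta_dict_sorted.all (fun pe => pe.2.all (fun ce =>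
    ce.1 != condition_type || ce.2.all (fun te => te.2.all (fun se =>
      se.2.any (fun kv => kv.1 == "alt_identifier")))))) = true
instance (meta_dict_sorted : List (String × List (String × List (String × List (String × List (String × String)))))) (condition_type : String) : Decidable (Pre_get_filname_prefixes meta_dict_sorted condition_type) := by unfold Pre_get_filname_prefixes; infer_instance

def pvWitness_get_filname_prefixes : (List (String × List (String × List (String × List (String × List (String × String)))))) × String :=
  ([("p1", [("tumor", [("rna", [("s1", [("alt_identifier", "X")]), ("s2", [("alt_identifier", "Y")])])]), ("normal", [("rna", [("s3", [("alt_identifier", "Z")])])])])], "tumor")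

def Spec_get_filname_prefixes (meta_dict_sorted : List (String × List (String × List (String × List (String × List (String × String)))))) (condition_type : String) (out : List (String × List (String × List String))) : Prop := out = get_filname_prefixes_alt meta_dict_sorted condition_type
instance (meta_dict_sorted : List (String × List (String × List (String × List (String × List (String × String)))))) (condition_type : String) (out : List (String × List (String × List String))) : Decidable (Spec_get_filname_prefixes meta_dict_sorted condition_type out) := by unfold Spec_get_filname_prefixes; infer_instance

-- ===== CLAIM (what is proved, stated in full; the proofs are below) =====
def Claim_equal_get_filname_prefixes : Prop := ∀ (meta_dict_sorted : List (String × List (String × List (String × List (String × List (String × String)))))) (condition_type : String), Dom_get_filname_prefixes meta_dict_sorted condition_type → Pre_get_filname_prefixes meta_dict_sorted condition_type → Spec_get_filname_prefixes meta_dict_sorted condition_type (get_filname_prefixes meta_dict_sorted condition_type)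

-- ===== LEMMAS AND PROOFS =====

-- both programs reduce to this normal form of the triple stream:
-- distinct patients (first occurrence), per patient distinct types, per type the alts in order
def pvNF (ts : List (String × String × String)) : List (String × List (String × List String)) :=
  (PySem.List.dedup (ts.map (·.1))).map (fun p =>
    let pairs := (ts.filter (fun tr => tr.1 == p)).map (·.2)
    (p, (PySem.List.dedup (pairs.map (·.1))).map (fun t =>
          (t, (pairs.filter (fun pr => pr.1 == t)).map (·.2)))))

-- A's 3-way branch body for one sample is exactly a modify-of-modify step.
theorem pv_step_eq (fp : PySem.Dict String (PySem.Dict String (List String))) (p t a : String) :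
    (if fp.contains p then
       let inner := fp.getD p PySem.Dict.empty
       if inner.contains t then
         fp.insert p (inner.insert t (inner.getD t [] ++ [a]))
       else
         fp.insert p (inner.insert t [a])
     else
       fp.insert p (PySem.Dict.mk [(t, [a])]))
    = fp.modify p PySem.Dict.empty (fun inner => inner.modify t [] (· ++ [a])) := by
  show _ = fp.insert p (((fp.getD p PySem.Dict.empty).getD t []).append [a] |> (fp.getD p PySem.Dict.empty).insert t)
  by_cases hp : fp.contains p
  · simp only [hp, if_true]
    by_cases ht : (fp.getD p PySem.Dict.empty).contains t
    · simp [ht]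
    · rw [PySem.Dict.getD_of_not_contains (fp.getD p PySem.Dict.empty) ([] : List String) (by simpa using ht)]
      simp
  · simp only [hp, if_false, Bool.false_eq_true]
    rw [PySem.Dict.getD_of_not_contains _ _ (by simpa using hp)]
    rfl

-- A's nested loops are the fold of that step over the flat triple stream.
theorem pv_fold_eq (meta_dict_sorted : List (String × List (String × List (String × List (String × List (String × String)))))) (condition_type : String)
    (fp0 : PySem.Dict String (PySem.Dict String (List String))) :
    meta_dict_sorted.foldl (fun fp pe =>
      pe.2.foldl (fun fp ce =>
        if ce.1 == condition_type then
          ce.2.foldl (fun fp te =>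
            te.2.foldl (fun fp se =>
              if fp.contains pe.1 then
                let inner := fp.getD pe.1 PySem.Dict.empty
                if inner.contains te.1 then
                  fp.insert pe.1 (inner.insert te.1 (inner.getD te.1 [] ++ [pvAlt se.2]))
                else
                  fp.insert pe.1 (inner.insert te.1 [pvAlt se.2])
              else
                fp.insert pe.1 (PySem.Dict.mk [(te.1, [pvAlt se.2])])
            ) fp
          ) fp
        else fp
      ) fp
    ) fp0
    = (pvTriples meta_dict_sorted condition_type).foldl
        (fun fp tr => fp.modify tr.1 PySem.Dict.empty (fun inner => inner.modify tr.2.1 [] (· ++ [tr.2.2])))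
        fp0 := by
  rw [pvTriples, List.foldl_flatMap]
  congr 1
  funext fp pe
  rw [List.foldl_flatMap]
  congr 1
  funext fp ce
  by_cases hc : ce.1 == condition_type
  · simp only [hc, if_true]
    rw [List.foldl_flatMap]
    congr 1
    funext fp te
    rw [List.foldl_map]
    congr 1
    funext fp se
    exact pv_step_eq fp pe.1 te.1 (pvAlt se.2)
  · simp [hc]

-- value of a grouping fold at one key: the fold of f over the entries with that key
theorem pv_getD_fold {κ β γ : Type} [BEq κ] [LawfulBEq κ] (key : β → κ) (c : γ) (f : γ → β → γ)
    (p : κ) (ts : List β) (d : PySem.Dict κ γ) :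
    (ts.foldl (fun d x => d.modify (key x) c (fun y => f y x)) d).getD p c
      = (ts.filter (fun x => key x == p)).foldl f (d.getD p c) := by
  induction ts generalizing d with
  | nil => rfl
  | cons x rest ih =>
    by_cases h : key x = p
    · subst h
      simp only [List.foldl_cons, List.filter_cons, beq_self_eq_true, if_true]
      rw [ih, PySem.Dict.getD_modify_self]
    · have hb : (key x == p) = false := by simpa using h
      simp only [List.foldl_cons, List.filter_cons, hb, Bool.false_eq_true, if_false]
      rw [ih, PySem.Dict.getD_modify_of_ne d c _ (Ne.symm h)]

-- items of a grouping fold from the empty dict: distinct keys, each with its folded value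
theorem pv_items_fold {κ β γ : Type} [BEq κ] [LawfulBEq κ] (key : β → κ) (c : γ) (f : γ → β → γ)
    (ts : List β) :
    (ts.foldl (fun d x => d.modify (key x) c (fun y => f y x)) PySem.Dict.empty).items
      = (PySem.List.dedup (ts.map key)).map
          (fun p => (p, (ts.filter (fun x => key x == p)).foldl f c)) := by
  have hnd : (ts.foldl (fun d x => d.modify (key x) c (fun y => f y x)) PySem.Dict.empty).keys.Nodup := by
    exact PySem.Dict.nodup_keys_foldl_modify_key ts key c (fun _ x => fun y => f y x) _ PySem.Dict.nodup_keys_empty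
  have hk : (ts.foldl (fun d x => d.modify (key x) c (fun y => f y x)) PySem.Dict.empty).keys
      = PySem.Set.ofList (ts.map key) := by
    have h := PySem.Dict.keys_foldl_modify_key ts key c (fun _ x => fun y => f y x) PySem.Dict.empty
    rw [h, PySem.Dict.keys_empty]
    exact PySem.Set.update_empty _
  rw [PySem.Dict.items_eq_map_keys _ hnd c, hk, PySem.List.dedup_eq_ofList]
  refine List.map_congr_left (fun p _ => ?_)
  rw [pv_getD_fold, PySem.Dict.getD_empty]

-- ===== A reduces to the normal form =====

-- outer grouping fold, characterised (specialisation of pv_items_fold)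
theorem pv_outer (ts : List (String × String × String)) :
    (ts.foldl (fun fp tr => fp.modify tr.1 PySem.Dict.empty (fun inner => inner.modify tr.2.1 [] (· ++ [tr.2.2]))) PySem.Dict.empty).items
      = (PySem.List.dedup (ts.map (·.1))).map
          (fun p => (p, (ts.filter (fun tr => tr.1 == p)).foldl (fun y tr => y.modify tr.2.1 [] (· ++ [tr.2.2])) PySem.Dict.empty)) :=
  pv_items_fold (fun tr => tr.1) PySem.Dict.empty (fun y tr => y.modify tr.2.1 [] (· ++ [tr.2.2])) ts

-- per-patient fold over triples = the same fold over the projected (type, alt) pairs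
theorem pv_fold_pairs (l : List (String × String × String)) :
    l.foldl (fun y tr => y.modify tr.2.1 [] (· ++ [tr.2.2])) PySem.Dict.empty
      = (l.map (·.2)).foldl (fun d pr => d.modify pr.1 [] (· ++ [pr.2])) PySem.Dict.empty :=
  Eq.symm List.foldl_map

-- inner grouping fold, characterised (specialisation of pv_items_fold + append-fold = map)
theorem pv_inner (ps : List (String × String)) :
    (ps.foldl (fun d pr => d.modify pr.1 [] (· ++ [pr.2])) PySem.Dict.empty).items
      = (PySem.List.dedup (ps.map (·.1))).map (fun t => (t, (ps.filter (fun pr => pr.1 == t)).map (·.2))) := by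
  rw [show (ps.foldl (fun d pr => d.modify pr.1 [] (· ++ [pr.2])) PySem.Dict.empty).items
      = (PySem.List.dedup (ps.map (·.1))).map (fun t => (t, (ps.filter (fun pr => pr.1 == t)).foldl (fun y pr => y ++ [pr.2]) []))
    from pv_items_fold (fun pr => pr.1) ([] : List String) (fun y pr => y ++ [pr.2]) ps]
  refine List.map_congr_left (fun t _ => ?_)
  simp only [PySem.List.foldl_append_singleton_eq_map, List.nil_append]

theorem pv_A_nf (m : List (String × List (String × List (String × List (String × List (String × String)))))) (ct : String) :
    get_filname_prefixes m ct = pvNF (pvTriples m ct) := by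
  unfold get_filname_prefixes pvNF
  rw [pv_fold_eq]
  dsimp only
  rw [pv_outer, List.map_map]
  refine List.map_congr_left (fun p _ => ?_)
  dsimp only [Function.comp]
  rw [pv_fold_pairs, pv_inner]

-- ===== facts about PySem.Set.ofList (ordered dedup) needed for B =====


theorem pv_mem_contains {α : Type} [BEq α] [LawfulBEq α] (s : PySem.Set α) (x : α) :
    s.contains x = true ↔ x ∈ s := by
  simp [PySem.Set.contains]

theorem pv_add_of_mem {α : Type} [BEq α] [LawfulBEq α] {s : PySem.Set α} {x : α} (h : x ∈ s) :
    PySem.Set.add s x = s := by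
  unfold PySem.Set.add
  rw [if_pos ((pv_mem_contains _ _).2 h)]

theorem pv_add_of_not_mem {α : Type} [BEq α] [LawfulBEq α] {s : PySem.Set α} {x : α} (h : x ∉ s) :
    PySem.Set.add s x = s ++ [x] := by
  unfold PySem.Set.add
  rw [if_neg (fun hc => h ((pv_mem_contains _ _).1 hc))]

theorem pv_filter_ofList {α : Type} [BEq α] [LawfulBEq α] (q : α → Bool) (xs : List α) :
    (PySem.Set.ofList xs).filter q = PySem.Set.ofList (xs.filter q) := by
  induction xs using List.reverseRecOn with
  | nil => rfl
  | append_singleton xs x ih =>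
    rw [PySem.Set.ofList_append_singleton, List.filter_append]
    by_cases hx : x ∈ xs
    · rw [pv_add_of_mem ((PySem.Set.mem_ofList _ _).2 hx)]
      by_cases hq : q x
      · rw [show List.filter q [x] = [x] from by simp [hq], PySem.Set.ofList_append_singleton,
          pv_add_of_mem ((PySem.Set.mem_ofList _ _).2 (List.mem_filter.2 ⟨hx, hq⟩)), ih]
      · rw [show List.filter q [x] = [] from by simp [hq], List.append_nil, ih]
    · rw [pv_add_of_not_mem (fun hc => hx ((PySem.Set.mem_ofList _ _).1 hc)), List.filter_append, ih]
      by_cases hq : q x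
      · rw [show List.filter q [x] = [x] from by simp [hq], PySem.Set.ofList_append_singleton,
          pv_add_of_not_mem (fun hc => hx (List.mem_filter.1 ((PySem.Set.mem_ofList _ _).1 hc)).1)]
      · rw [show List.filter q [x] = [] from by simp [hq], List.append_nil, List.append_nil]

theorem pv_map_ofList_inj {α β : Type} [BEq α] [BEq β] [LawfulBEq α] [LawfulBEq β]
    (g : α → β) (hg : Function.Injective g) (xs : List α) :
    (PySem.Set.ofList xs).map g = PySem.Set.ofList (xs.map g) := by
  induction xs using List.reverseRecOn with
  | nil => rfl
  | append_singleton xs x ih =>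
    rw [PySem.Set.ofList_append_singleton, show List.map g (xs ++ [x]) = xs.map g ++ [g x] from by simp,
      PySem.Set.ofList_append_singleton]
    by_cases hx : x ∈ xs
    · rw [pv_add_of_mem ((PySem.Set.mem_ofList _ _).2 hx),
        pv_add_of_mem ((PySem.Set.mem_ofList _ _).2 (List.mem_map_of_mem hx)), ih]
    · have h2 : g x ∉ xs.map g := by
        intro hc
        obtain ⟨y, hy, hgy⟩ := List.mem_map.1 hc
        exact hx (hg hgy ▸ hy)
      rw [pv_add_of_not_mem (fun hc => hx ((PySem.Set.mem_ofList _ _).1 hc)),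
        pv_add_of_not_mem (fun hc => h2 ((PySem.Set.mem_ofList _ _).1 hc)), List.map_append, ih]
      rfl

theorem pv_ofList_map_ofList {α β : Type} [BEq α] [BEq β] [LawfulBEq α] [LawfulBEq β]
    (g : α → β) (xs : List α) :
    PySem.Set.ofList ((PySem.Set.ofList xs).map g) = PySem.Set.ofList (xs.map g) := by
  induction xs using List.reverseRecOn with
  | nil => rfl
  | append_singleton xs x ih =>
    rw [PySem.Set.ofList_append_singleton, show List.map g (xs ++ [x]) = xs.map g ++ [g x] from by simp,
      PySem.Set.ofList_append_singleton]
    by_cases hx : x ∈ xs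
    · rw [pv_add_of_mem ((PySem.Set.mem_ofList _ _).2 hx), ih,
        pv_add_of_mem ((PySem.Set.mem_ofList _ _).2 (List.mem_map_of_mem hx))]
    · rw [pv_add_of_not_mem (fun hc => hx ((PySem.Set.mem_ofList _ _).1 hc)), List.map_append,
        show List.map g [x] = [g x] from rfl, PySem.Set.ofList_append_singleton, ih]

theorem pv_update_self {α : Type} [BEq α] [LawfulBEq α] (s : PySem.Set α) (l : List α)
    (h : ∀ x ∈ l, x ∈ s) : PySem.Set.update s l = s := by
  rw [PySem.Set.update_eq_append_filter]
  have hnil : (PySem.Set.ofList l).filter (fun y => !(s.contains y)) = [] := by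
    rw [List.filter_eq_nil_iff]
    intro y hy
    rw [(pv_mem_contains s y).2 (h y ((PySem.Set.mem_ofList _ _).1 hy))]
    simp
  rw [hnil, List.append_nil]

-- ===== B reduces to the normal form =====

-- a fold of constant-value inserts never stores anything but the constant
theorem pv_getD_insert_const {κ ν β : Type} [BEq κ] [LawfulBEq κ] [DecidableEq κ]
    (c : ν) (k : β → κ) (l : List β) (d : PySem.Dict κ ν) (h : ∀ p, d.getD p c = c) (p : κ) :
    (l.foldl (fun r x => r.insert (k x) c) d).getD p c = c := by
  induction l generalizing d with
  | nil => exact h p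
  | cons x rest ih =>
    refine ih _ (fun p' => ?_)
    rw [PySem.Dict.getD_insert]
    split_ifs with hp
    · rfl
    · exact h p'

-- distinct fresh inserts into the empty dict just list the pairs
theorem pv_items_insert_fresh (l : List ((String × String) × List String))
    (hnd : (l.map (fun q => q.1.2)).Nodup) :
    ((l.foldl (fun y q => y.insert q.1.2 q.2) (PySem.Dict.empty : PySem.Dict String (List String))).items)
      = l.map (fun q => (q.1.2, q.2)) :=
  (PySem.Dict.items_foldl_insert_fresh l (fun q => q.1.2) (fun q => q.2) PySem.Dict.empty
      (fun _ _ => PySem.Dict.contains_empty _) hnd).trans (List.nil_append _)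

-- the per-patient inner dict, assembled from the filtered flat groups
theorem pv_inner_assemble (ts : List (String × String × String)) (p : String) :
    ((((PySem.List.dedup (((ts.filter (fun tr => tr.1 == p)).map (·.2)).map (·.1))).map (fun t => ((p, t) : String × String))).map
        (fun k => (k, (ts.filter (fun tr => (tr.1, tr.2.1) == k)).map (·.2.2)))).foldl
      (fun y q => y.insert q.1.2 q.2) PySem.Dict.empty).items
    = (PySem.List.dedup (((ts.filter (fun tr => tr.1 == p)).map (·.2)).map (·.1))).map
        (fun t => (t, ((((ts.filter (fun tr => tr.1 == p)).map (·.2)).filter (fun pr => pr.1 == t)).map (·.2)))) := by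
  rw [List.map_map]
  rw [pv_items_insert_fresh _ (by
    rw [List.map_map]
    rw [show (((fun q : (String × String) × List String => q.1.2)) ∘ ((fun k : String × String => (k, (ts.filter (fun tr => (tr.1, tr.2.1) == k)).map (·.2.2))) ∘ (fun t : String => ((p, t) : String × String)))) = (fun t : String => t) from rfl]
    rw [show (fun t : String => t) = (id : String → String) from rfl, List.map_id]
    exact PySem.List.nodup_dedup _)]
  rw [List.map_map]
  refine List.map_congr_left (fun t _ => ?_)
  show ((t : String), (ts.filter (fun tr => (tr.1, tr.2.1) == ((p, t) : String × String))).map (·.2.2)) = _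
  refine congrArg (fun l => ((t : String), l)) ?_
  rw [List.filter_map, List.map_map,
    show ((fun pr : String × String => pr.1 == t) ∘ fun tr : String × String × String => tr.2) = (fun tr => tr.2.1 == t) from rfl,
    List.filter_filter]
  refine congrArg _ (List.filter_congr (fun tr _ => ?_))
  rw [show ((tr.1, tr.2.1) == ((p, t) : String × String)) = (tr.1 == p && tr.2.1 == t) from rfl, Bool.and_comm]


theorem pv_B_nf (m : List (String × List (String × List (String × List (String × List (String × String)))))) (ct : String) :
    get_filname_prefixes_alt m ct = pvNF (pvTriples m ct) := by
  unfold get_filname_prefixes_alt pvNF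
  dsimp only
  set ts := pvTriples m ct with hts
  -- the flat dict, characterised
  have hflat : (ts.foldl (fun d tr => d.modify (tr.1, tr.2.1) [] (· ++ [tr.2.2])) PySem.Dict.empty).items
      = (PySem.List.dedup (ts.map (fun tr => (tr.1, tr.2.1)))).map
          (fun k => (k, (ts.filter (fun tr => (tr.1, tr.2.1) == k)).map (·.2.2))) := by
    rw [show (ts.foldl (fun d tr => d.modify (tr.1, tr.2.1) [] (· ++ [tr.2.2])) PySem.Dict.empty).items
        = (PySem.List.dedup (ts.map (fun tr => (tr.1, tr.2.1)))).map
            (fun k => (k, (ts.filter (fun tr => (tr.1, tr.2.1) == k)).foldl (fun y tr => y ++ [tr.2.2]) []))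
      from pv_items_fold (fun tr => (tr.1, tr.2.1)) ([] : List String) (fun y tr => y ++ [tr.2.2]) ts]
    refine List.map_congr_left (fun k _ => ?_)
    simp only [PySem.List.foldl_append_singleton_eq_map, List.nil_append]
  set L := (ts.foldl (fun d tr => d.modify (tr.1, tr.2.1) [] (· ++ [tr.2.2])) PySem.Dict.empty).items with hL
  -- the result0 skeleton
  set r0 := L.foldl (fun r q => r.insert q.1.1 (PySem.Dict.empty : PySem.Dict String (List String))) PySem.Dict.empty with hr0
  have hr0nd : r0.keys.Nodup :=
    PySem.Dict.nodup_keys_foldl_insert_key L (fun q => q.1.1) (fun _ _ => PySem.Dict.empty) _ PySem.Dict.nodup_keys_empty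
  have hr0k : r0.keys = PySem.Set.ofList (L.map (·.1.1)) := by
    rw [hr0, PySem.Dict.keys_foldl_insert_key L (fun q => q.1.1) (fun _ _ => PySem.Dict.empty) PySem.Dict.empty,
      PySem.Dict.keys_empty]
    exact PySem.Set.update_empty _
  have hr0g : ∀ p, r0.getD p PySem.Dict.empty = PySem.Dict.empty :=
    pv_getD_insert_const PySem.Dict.empty (fun q => q.1.1) L PySem.Dict.empty
      (fun p => PySem.Dict.getD_empty p PySem.Dict.empty)
  -- the final result dict
  set r := L.foldl (fun r q => r.modify q.1.1 PySem.Dict.empty (fun inner => inner.insert q.1.2 q.2)) r0 with hr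
  have hrnd : r.keys.Nodup :=
    PySem.Dict.nodup_keys_foldl_modify_key L (fun q => q.1.1) PySem.Dict.empty
      (fun _ q => fun inner => inner.insert q.1.2 q.2) _ hr0nd
  have hrk : r.keys = PySem.Set.ofList (L.map (·.1.1)) := by
    rw [hr, PySem.Dict.keys_foldl_modify_key L (fun q => q.1.1) PySem.Dict.empty
      (fun _ q => fun inner => inner.insert q.1.2 q.2) r0, hr0k]
    exact pv_update_self _ _ (fun x hx => (PySem.Set.mem_ofList _ _).2 hx)
  have hrg : ∀ p, r.getD p PySem.Dict.empty
      = (L.filter (fun q => q.1.1 == p)).foldl (fun y q => y.insert q.1.2 q.2) PySem.Dict.empty := by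
    intro p
    rw [hr, show (fun (r : PySem.Dict String (PySem.Dict String (List String))) (q : (String × String) × List String) =>
        r.modify q.1.1 PySem.Dict.empty (fun inner => inner.insert q.1.2 q.2))
      = (fun r q => r.modify ((fun (q : (String × String) × List String) => q.1.1) q) PySem.Dict.empty
          (fun y => (fun (y : PySem.Dict String (List String)) (q : (String × String) × List String) => y.insert q.1.2 q.2) y q)) from rfl,
      pv_getD_fold (fun q => q.1.1) PySem.Dict.empty (fun y q => y.insert q.1.2 q.2) p L r0, hr0g p]
  -- assemble
  rw [PySem.Dict.items_eq_map_keys r hrnd PySem.Dict.empty, hrk, List.map_map]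
  -- the outer key list is the distinct patients of the stream
  have hkeys : PySem.Set.ofList (((PySem.List.dedup (ts.map (fun tr => (tr.1, tr.2.1)))).map
        (fun k => (k, (ts.filter (fun tr => (tr.1, tr.2.1) == k)).map (·.2.2)))).map (·.1.1))
      = PySem.List.dedup (ts.map (·.1)) := by
    rw [List.map_map, PySem.List.dedup_eq_ofList, PySem.List.dedup_eq_ofList,
      show ((fun (q : (String × String) × List String) => q.1.1) ∘ fun k => ((k : String × String), (ts.filter (fun tr => (tr.1, tr.2.1) == k)).map (·.2.2))) = (fun k : String × String => k.1) from rfl,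
      pv_ofList_map_ofList (fun k : String × String => k.1) (ts.map (fun tr => (tr.1, tr.2.1))), List.map_map,
      show ((fun k : String × String => k.1) ∘ fun tr : String × String × String => (tr.1, tr.2.1)) = (fun tr => tr.1) from rfl]
  rw [hflat, hkeys]
  refine List.map_congr_left (fun p hp => ?_)
  dsimp only [Function.comp]
  rw [hrg p, hflat]
  -- the per-patient slice of the flat items, as a map over the distinct types
  have hfilt : ((PySem.List.dedup (ts.map (fun tr => (tr.1, tr.2.1)))).map
        (fun k => (k, (ts.filter (fun tr => (tr.1, tr.2.1) == k)).map (·.2.2)))).filter (fun q => q.1.1 == p)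
      = ((PySem.List.dedup (((ts.filter (fun tr => tr.1 == p)).map (·.2)).map (·.1))).map (fun t => ((p, t) : String × String))).map
          (fun k => (k, (ts.filter (fun tr => (tr.1, tr.2.1) == k)).map (·.2.2))) := by
    rw [List.filter_map,
      show ((fun (q : (String × String) × List String) => q.1.1 == p) ∘ fun k => ((k : String × String), (ts.filter (fun tr => (tr.1, tr.2.1) == k)).map (·.2.2))) = (fun k : String × String => k.1 == p) from rfl,
      PySem.List.dedup_eq_ofList, pv_filter_ofList, List.filter_map,
      show ((fun k : String × String => k.1 == p) ∘ fun tr : String × String × String => (tr.1, tr.2.1)) = (fun tr => tr.1 == p) from rfl]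
    have hmc : (ts.filter (fun tr => tr.1 == p)).map (fun tr => ((tr.1, tr.2.1) : String × String))
        = (ts.filter (fun tr => tr.1 == p)).map (fun tr => ((p, tr.2.1) : String × String)) := by
      refine List.map_congr_left (fun tr htr => ?_)
      have h1 : tr.1 = p := by simpa using (List.mem_filter.1 htr).2
      rw [h1]
    rw [hmc, show (fun tr : String × String × String => ((p, tr.2.1) : String × String)) = ((fun t => ((p, t) : String × String)) ∘ fun tr => tr.2.1) from rfl,
      ← List.map_map, ← pv_map_ofList_inj (fun t => ((p, t) : String × String)) (fun a b h => by simpa using h),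
      ← PySem.List.dedup_eq_ofList, List.map_map, List.map_map]
    rw [List.map_map]
    rfl
  rw [hfilt, pv_inner_assemble ts p]

-- ===== VERDICT (by name: the statement is the Claim_ definition above) =====
theorem get_filname_prefixes_spec : Claim_equal_get_filname_prefixes := by
  intro m ct _ _
  unfold Spec_get_filname_prefixes
  rw [pv_A_nf, pv_B_nf]
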